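-- pv_equiv track=rewrite | github.com/Skywalker2012/qiskit-terra | qiskit/transpiler/passes/paulihedral/block_ordering.py | str_lex_key
-- ===== SOURCE A (Python) =====
-- def str_lex_key(weighted_pauli_str):
--     value = 0
--     '''q0 corresponds to the right-most pauli op'''
--     for op in weighted_pauli_str[0]:
--         value *= 4
--         if op == 'I':
--             value += 0
--         elif op == 'X':
--             value += 1
--         elif op == 'Y':
--             value += 2
--         elif op == 'Z':
--             value += 3
--     return -value
-- ===== SOURCE B (Python) =====
-- _DIGIT = {'I': 0, 'X': 1, 'Y': 2, 'Z': 3}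
--
--
-- def _val(s):
--     '''base-4 value of the pauli string s, most-significant op first'''
--     if len(s) <= 1:
--         return _DIGIT.get(s, 0)
--     mid = len(s) // 2
--     return _val(s[:mid]) * 4 ** (len(s) - mid) + _val(s[mid:])
--
--
-- def str_lex_key(weighted_pauli_str):
--     '''q0 corresponds to the right-most pauli op'''
--     return -_val(weighted_pauli_str[0])
-- ===== Notes on version B (the rewrite author's own statement) =====
-- stated objective: alternative
-- what changed: Replaces A's left-to-right Horner loop (value = value*4 + digit via an if/elif chain) with a recursive divide-and-conquer base-4 evaluation (value(s) = value(left)*4**|right| + value(right), digit map with .get(s, 0) at the leaves).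
import Mathlib
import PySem

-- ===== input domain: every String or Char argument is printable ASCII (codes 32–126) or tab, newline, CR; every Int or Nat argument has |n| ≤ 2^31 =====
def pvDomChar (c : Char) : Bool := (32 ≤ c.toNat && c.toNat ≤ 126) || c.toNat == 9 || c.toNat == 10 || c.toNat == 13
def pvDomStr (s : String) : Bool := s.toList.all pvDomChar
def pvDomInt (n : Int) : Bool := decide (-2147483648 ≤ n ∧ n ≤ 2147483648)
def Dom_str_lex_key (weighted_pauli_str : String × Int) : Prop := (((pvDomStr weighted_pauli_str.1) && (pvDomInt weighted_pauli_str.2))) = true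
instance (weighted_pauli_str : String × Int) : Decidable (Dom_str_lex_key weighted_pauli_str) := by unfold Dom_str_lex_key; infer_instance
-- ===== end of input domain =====

-- B replaces A's left-to-right Horner loop (value = value*4 + digit via an if/elif chain) by a
-- divide-and-conquer base-4 evaluation with a digit-map lookup at the leaves (objective: alternative).

-- ===== PORT A =====
def str_lex_key (weighted_pauli_str : String × Int) : Int :=
  let value : Int :=
    weighted_pauli_str.1.toList.foldl (fun value op =>
      let value := value * 4
      if op = 'I' then value + 0
      else if op = 'X' then value + 1
      else if op = 'Y' then value + 2
      else if op = 'Z' then value + 3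
      else value) 0
  (-value)

-- ===== PORT B =====
-- _DIGIT = {'I': 0, 'X': 1, 'Y': 2, 'Z': 3}  (keys are 1-char strings)
def pvDigitMap : PySem.Dict String Int :=
  PySem.Dict.ofList [("I", 0), ("X", 1), ("Y", 2), ("Z", 3)]

-- _val(s): len(s) and len(s)//2 are Nats (Python // on nonnegatives = Nat division);
-- s[:mid] / s[mid:] with 0 ≤ mid ≤ len are exactly take/drop (PySem.List.slice_to/slice_from);
-- 4 ** (len(s) - mid) has a nonnegative exponent, exactly Monoid.npow.
def pvValB (l : List Char) : Int :=
  if l.length ≤ 1 then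
    pvDigitMap.getD (String.ofList l) 0
  else
    pvValB (l.take (l.length / 2)) * 4 ^ (l.length - l.length / 2)
      + pvValB (l.drop (l.length / 2))
termination_by l.length
decreasing_by
  · simp only [List.length_take]; omega
  · simp only [List.length_drop]; omega

def str_lex_key_alt (weighted_pauli_str : String × Int) : Int :=
  (-(pvValB weighted_pauli_str.1.toList))

-- ===== PRECONDITION & SPEC =====
def Spec_str_lex_key (weighted_pauli_str : String × Int) (out : Int) : Prop := out = str_lex_key_alt weighted_pauli_str
instance (weighted_pauli_str : String × Int) (out : Int) : Decidable (Spec_str_lex_key weighted_pauli_str out) := by unfold Spec_str_lex_key; infer_instance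

-- ===== CLAIM (what is proved, stated in full; the proofs are below) =====
def Claim_equal_str_lex_key : Prop := ∀ (weighted_pauli_str : String × Int), Dom_str_lex_key weighted_pauli_str → Spec_str_lex_key weighted_pauli_str (str_lex_key weighted_pauli_str)

-- ===== LEMMAS AND PROOFS =====

-- digit of one char = B's dict lookup at the 1-char string.
def pvDigit (c : Char) : Int := pvDigitMap.getD (String.ofList [c]) 0

-- Base-4 value of a char list read LEAST-significant-digit-first.
def pvVal : List Char → Int
  | [] => 0
  | c :: m => pvDigit c + 4 * pvVal m

theorem pvDigit_of_ne (c : Char) (h1 : c ≠ 'I') (h2 : c ≠ 'X') (h3 : c ≠ 'Y')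
    (h4 : c ≠ 'Z') : pvDigit c = 0 := by
  simp only [pvDigit, pvDigitMap, PySem.Dict.ofList, PySem.Dict.update, List.foldl,
    PySem.Dict.getD_insert, PySem.Dict.getD_empty, String.ext_iff]
  simp_all

-- A's loop body equals "times 4 plus the digit".
theorem pv_step_eq (v : Int) (c : Char) :
    (let value := v * 4
     if c = 'I' then value + 0
     else if c = 'X' then value + 1
     else if c = 'Y' then value + 2
     else if c = 'Z' then value + 3
     else value) = v * 4 + pvDigit c := by
  by_cases h1 : c = 'I'
  · subst h1; simp; decide
  by_cases h2 : c = 'X'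
  · subst h2; simp; decide
  by_cases h3 : c = 'Y'
  · subst h3; simp; decide
  by_cases h4 : c = 'Z'
  · subst h4; simp; decide
  simp [h1, h2, h3, h4, pvDigit_of_ne c h1 h2 h3 h4]

theorem pvVal_append (a b : List Char) :
    pvVal (a ++ b) = pvVal a + 4 ^ a.length * pvVal b := by
  induction a with
  | nil => simp [pvVal]
  | cons c a ih => simp only [List.cons_append, pvVal, ih, List.length_cons]; ring

-- Invariant of the simplified Horner fold (most-significant digit first).
theorem pv_fold_eq' (l : List Char) (v : Int) :
    l.foldl (fun value op => value * 4 + pvDigit op) v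
      = v * 4 ^ l.length + pvVal l.reverse := by
  induction l generalizing v with
  | nil => simp [pvVal]
  | cons c l ih =>
    simp only [List.foldl_cons, ih, List.reverse_cons, pvVal_append,
      List.length_cons, List.length_reverse, pvVal]
    ring

-- A's fold (with the if/elif chain) computes the same value.
theorem pv_fold_eq (l : List Char) (v : Int) :
    l.foldl (fun value op =>
      let value := value * 4
      if op = 'I' then value + 0
      else if op = 'X' then value + 1
      else if op = 'Y' then value + 2
      else if op = 'Z' then value + 3
      else value) v = v * 4 ^ l.length + pvVal l.reverse := by
  simp only [pv_step_eq]
  exact pv_fold_eq' l v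

-- B's divide-and-conquer computes the same value.
theorem pvValB_eq_aux (n : Nat) : ∀ l : List Char, l.length ≤ n → pvValB l = pvVal l.reverse := by
  induction n with
  | zero =>
    intro l hl
    have : l = [] := List.eq_nil_of_length_eq_zero (by omega)
    subst this
    simp [pvValB, pvVal]
    decide
  | succ n ih =>
    intro l hl
    rw [pvValB]
    by_cases h : l.length ≤ 1
    · simp only [if_pos h]
      match l, h with
      | [], _ => simp [pvVal]; decide
      | [c], _ => simp [pvVal, pvDigit]
    · simp only [if_neg h]
      have hlen : 2 ≤ l.length := by omega
      have ht := ih (l.take (l.length / 2)) (by simp [List.length_take]; omega)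
      have hd := ih (l.drop (l.length / 2)) (by simp [List.length_drop]; omega)
      have hsplit : l.reverse = (l.drop (l.length / 2)).reverse ++ (l.take (l.length / 2)).reverse := by
        rw [← List.reverse_append, List.take_append_drop]
      rw [ht, hd, hsplit, pvVal_append]
      simp only [List.length_reverse, List.length_drop]
      ring

theorem pvValB_eq (l : List Char) : pvValB l = pvVal l.reverse :=
  pvValB_eq_aux l.length l le_rfl

-- ===== VERDICT (by name: the statement is the Claim_ definition above) =====
theorem str_lex_key_spec : Claim_equal_str_lex_key := by
  intro w _
  show str_lex_key w = str_lex_key_alt w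
  simp only [str_lex_key, str_lex_key_alt, pv_fold_eq, pvValB_eq]
  ring
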